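-- pv_equiv track=rewrite | github.com/askeywifisit-ui/charter_project | backups/full_backup_20260317_194938/tools/wifi_nm.py | split_nmcli_terse
-- ===== SOURCE A (Python) =====
-- from typing import Any, Dict, List, Optional, Tuple
--
-- def split_nmcli_terse(line: str, sep: str = ":", esc: str = "\\") -> List[str]:
--     """
--     Split nmcli -t output line by separator, respecting escape (\\: means literal ':').
--
--     Example input:
--       SpectrumSetup-6A4D:90\\:D3\\:CF\\:EB\\:6A\\:4B:5220 MHz:100:WPA2
--
--     Should split into 5 fields:
--       [SSID, BSSID, FREQ, SIGNAL, SECURITY]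
--     with unescaped values:
--       BSSID becomes 90:D3:CF:EB:6A:4B
--     """
--     out: List[str] = []
--     buf: List[str] = []
--     i = 0
--     while i < len(line):
--         ch = line[i]
--         if ch == esc:
--             # Escape next char (if any) and include it literally
--             if i + 1 < len(line):
--                 buf.append(line[i + 1])
--                 i += 2
--                 continue
--             # trailing backslash, keep it
--             buf.append(ch)
--             i += 1
--             continue
--         if ch == sep:
--             out.append("".join(buf))
--             buf = []
--             i += 1
--             continue
--         buf.append(ch)
--         i += 1
--     out.append("".join(buf))
--     return out
-- ===== SOURCE B (Python) =====
-- from typing import List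
--
--
-- def _cut_positions(line: str, sep: str, esc: str) -> List[int]:
--     """Indices of the unescaped separators in line."""
--     cuts: List[int] = []
--     i = 0
--     n = len(line)
--     while i < n:
--         ch = line[i]
--         if ch == esc:
--             i += 2 if i + 1 < n else 1
--         elif ch == sep:
--             cuts.append(i)
--             i += 1
--         else:
--             i += 1
--     return cuts
--
--
-- def _unescape(s: str, esc: str) -> str:
--     out = []
--     i = 0
--     while i < len(s):
--         c = s[i]
--         if c == esc:
--             if i + 1 < len(s):
--                 out.append(s[i + 1])
--                 i += 2
--             else:
--                 out.append(c)
--                 i += 1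
--         else:
--             out.append(c)
--             i += 1
--     return "".join(out)
--
--
-- def split_nmcli_terse(line: str, sep: str = ":", esc: str = "\\") -> List[str]:
--     pieces: List[str] = []
--     start = 0
--     for k in _cut_positions(line, sep, esc):
--         pieces.append(line[start:k])
--         start = k + 1
--     pieces.append(line[start:])
--     return [_unescape(p, esc) for p in pieces]
-- ===== Notes on version B (the rewrite author's own statement) =====
-- stated objective: alternative
-- what changed: B first splits the line by structural recursion into raw still-escaped pieces at unescaped separators, then unescapes each piece in a second pass, instead of A's single index-driven while loop with shared out/buf accumulators and i+=2 jumps.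
import Mathlib
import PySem

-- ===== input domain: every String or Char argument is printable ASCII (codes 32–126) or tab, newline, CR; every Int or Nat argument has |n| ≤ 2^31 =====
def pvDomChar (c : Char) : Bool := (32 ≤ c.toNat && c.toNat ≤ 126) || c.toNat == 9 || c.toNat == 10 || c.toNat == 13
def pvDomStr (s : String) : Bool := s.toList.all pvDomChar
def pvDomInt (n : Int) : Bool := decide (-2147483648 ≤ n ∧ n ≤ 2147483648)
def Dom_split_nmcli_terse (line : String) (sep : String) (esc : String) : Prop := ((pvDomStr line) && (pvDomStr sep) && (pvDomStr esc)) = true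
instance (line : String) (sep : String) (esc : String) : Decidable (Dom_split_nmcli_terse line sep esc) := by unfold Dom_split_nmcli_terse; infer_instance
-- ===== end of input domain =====

-- B first finds the cut positions of the unescaped separators, then slices the line into pieces and
-- unescapes each piece, instead of A's single index loop with shared out/buf accumulators
-- (objective: alternative; same O(n) cost).

-- Python's `ch == s` for a one-character ch against the parameter string s (exact: true iff s is that single char)
def pvIsChr (s : String) (c : Char) : Bool := s.toList == [c]

-- ===== PORT A =====
-- A's while loop over index i: state (buf, out); ch = line[i]; i advances by 1 or 2.
-- Ported as the recursion on the remaining characters (i < len ↔ cs ≠ [], line[i+1] = second of cs).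
def pvLoopA (sep esc : String) : List Char → List Char → List String → List String
  | [], buf, out => out ++ [String.ofList buf]            -- out.append("".join(buf)) after the loop
  | c :: rest, buf, out =>
    if pvIsChr esc c then
      match rest with
      | c2 :: rest2 => pvLoopA sep esc rest2 (buf ++ [c2]) out   -- escape next char, i += 2
      | [] => pvLoopA sep esc [] (buf ++ [c]) out                -- trailing escape, keep it
    else if pvIsChr sep c then
      pvLoopA sep esc rest [] (out ++ [String.ofList buf])       -- flush field
    else
      pvLoopA sep esc rest (buf ++ [c]) out

def split_nmcli_terse (line : String) (sep : String) (esc : String) : List String :=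
  pvLoopA sep esc line.toList [] []

-- ===== PORT B =====
-- _cut_positions: indices of the unescaped separators (while loop over i, ported as recursion
-- on the remaining characters, carrying the absolute index i)
def pvCuts (sep esc : String) : List Char → Nat → List Nat
  | [], _ => []
  | c :: rest, i =>
    if pvIsChr esc c then
      match rest with
      | _ :: rest2 => pvCuts sep esc rest2 (i + 2)      -- i += 2
      | [] => pvCuts sep esc [] (i + 1)                 -- trailing escape, i += 1
    else if pvIsChr sep c then
      i :: pvCuts sep esc rest (i + 1)                  -- cuts.append(i)
    else
      pvCuts sep esc rest (i + 1)

-- the slicing loop: pieces.append(line[start:k]); start = k+1; finally line[start:].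
-- line[start:k] with 0 ≤ start ≤ k and line[start:] are exactly take (k-start) ∘ drop start / drop start.
def pvPieces (full : List Char) : List Nat → Nat → List (List Char)
  | [], start => [full.drop start]
  | k :: t, start => ((full.drop start).take (k - start)) :: pvPieces full t (k + 1)

-- _unescape: while loop over i (ported as recursion on the remaining characters)
def pvUnescB (esc : String) : List Char → List Char
  | [] => []
  | c :: rest =>
    if pvIsChr esc c then
      match rest with
      | c2 :: rest2 => c2 :: pvUnescB esc rest2         -- keep escaped char, i += 2
      | [] => [c]                                       -- trailing escape kept, i += 1
    else
      c :: pvUnescB esc rest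

def split_nmcli_terse_alt (line : String) (sep : String) (esc : String) : List String :=
  (pvPieces line.toList (pvCuts sep esc line.toList 0) 0).map
    (fun p => String.ofList (pvUnescB esc p))

-- ===== PRECONDITION & SPEC =====
def Spec_split_nmcli_terse (line : String) (sep : String) (esc : String) (out : List String) : Prop := out = split_nmcli_terse_alt line sep esc
instance (line : String) (sep : String) (esc : String) (out : List String) : Decidable (Spec_split_nmcli_terse line sep esc out) := by unfold Spec_split_nmcli_terse; infer_instance

-- ===== CLAIM (what is proved, stated in full; the proofs are below) =====
def Claim_equal_split_nmcli_terse : Prop := ∀ (line : String) (sep : String) (esc : String), Dom_split_nmcli_terse line sep esc → Spec_split_nmcli_terse line sep esc (split_nmcli_terse line sep esc)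

-- ===== LEMMAS AND PROOFS =====

-- prepend a prefix to the first piece
def pvAddHead (buf : List Char) : List (List Char) → List (List Char)
  | [] => [buf]
  | h :: t => (buf ++ h) :: t

-- bridge: the raw (still-escaped) pieces, computed structurally; both ports are related to it
def pvTokB (sep esc : String) : List Char → List (List Char)
  | [] => [[]]
  | c :: rest =>
    if pvIsChr esc c then
      match rest with
      | c2 :: rest2 =>
        let r := pvTokB sep esc rest2
        (c :: c2 :: r.headD []) :: r.tail
      | [] => [[c]]
    else if pvIsChr sep c then
      [] :: pvTokB sep esc rest
    else
      let r := pvTokB sep esc rest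
      (c :: r.headD []) :: r.tail

lemma pvTokB_ne_nil (sep esc : String) (cs : List Char) : pvTokB sep esc cs ≠ [] := by
  induction cs using pvTokB.induct sep esc with
  | case1 => simp [pvTokB]
  | case2 c h c2 rest2 ih => simp [pvTokB, h]
  | case3 c h => simp [pvTokB, h]
  | case4 c rest h hs ih =>
    rw [pvTokB.eq_def]
    simp [h, hs]
  | case5 c rest h hs ih =>
    rw [pvTokB.eq_def]
    simp [h, hs]

lemma pvTokB_cons_sep (sep esc : String) (c : Char) (rest : List Char)
    (h : ¬ pvIsChr esc c = true) (hs : pvIsChr sep c = true) :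
    pvTokB sep esc (c :: rest) = [] :: pvTokB sep esc rest := by
  conv_lhs => rw [pvTokB.eq_def]
  simp [h, hs]

lemma pvTokB_cons_other (sep esc : String) (c : Char) (rest : List Char)
    (h : ¬ pvIsChr esc c = true) (hs : ¬ pvIsChr sep c = true) :
    pvTokB sep esc (c :: rest) = (c :: (pvTokB sep esc rest).headD []) :: (pvTokB sep esc rest).tail := by
  conv_lhs => rw [pvTokB.eq_def]
  simp [h, hs]

lemma pvUnescB_cons_other (esc : String) (c : Char) (rest : List Char)
    (h : ¬ pvIsChr esc c = true) : pvUnescB esc (c :: rest) = c :: pvUnescB esc rest := by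
  conv_lhs => rw [pvUnescB.eq_def]
  simp [h]

-- A's loop equals the bridge pieces, unescaped, with buf prefixed to the first open piece
lemma pvLoopA_eq (sep esc : String) (cs : List Char) :
    ∀ buf out, pvLoopA sep esc cs buf out =
      out ++ (pvAddHead buf ((pvTokB sep esc cs).map (pvUnescB esc))).map String.ofList := by
  induction cs using pvTokB.induct sep esc with
  | case1 =>
    intro buf out
    simp [pvLoopA, pvTokB, pvUnescB, pvAddHead]
  | case2 c h c2 rest2 ih =>
    intro buf out
    have hne : pvTokB sep esc rest2 ≠ [] := pvTokB_ne_nil sep esc rest2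
    obtain ⟨p, ps, hp⟩ := List.exists_cons_of_ne_nil hne
    simp only [pvLoopA, h, if_true]
    rw [ih (buf ++ [c2]) out]
    simp [pvTokB, h, hp, pvUnescB, pvAddHead]
  | case3 c h =>
    intro buf out
    simp [pvLoopA, h, pvTokB, pvUnescB, pvAddHead]
  | case4 c rest h hs ih =>
    intro buf out
    have hne : pvTokB sep esc rest ≠ [] := pvTokB_ne_nil sep esc rest
    obtain ⟨p, ps, hp⟩ := List.exists_cons_of_ne_nil hne
    rw [pvLoopA.eq_def]
    simp only [h, hs, Bool.false_eq_true, if_false, if_true]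
    rw [ih [] (out ++ [String.ofList buf])]
    rw [pvTokB_cons_sep sep esc c rest h hs]
    simp [hp, pvAddHead, pvUnescB]
  | case5 c rest h hs ih =>
    intro buf out
    have hne : pvTokB sep esc rest ≠ [] := pvTokB_ne_nil sep esc rest
    obtain ⟨p, ps, hp⟩ := List.exists_cons_of_ne_nil hne
    rw [pvLoopA.eq_def]
    simp only [h, hs, Bool.false_eq_true, if_false]
    rw [ih (buf ++ [c]) out]
    rw [pvTokB_cons_other sep esc c rest h hs]
    simp [hp, pvAddHead, pvUnescB_cons_other esc c p h]

-- every cut position is at least the running index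
lemma pvCuts_ge (sep esc : String) (cs : List Char) :
    ∀ i, ∀ k ∈ pvCuts sep esc cs i, i ≤ k := by
  induction cs using pvTokB.induct sep esc with
  | case1 => intro i k hk; simp [pvCuts] at hk
  | case2 c h c2 rest2 ih =>
    intro i k hk
    simp only [pvCuts, h, if_true] at hk
    have := ih (i + 2) k hk
    omega
  | case3 c h =>
    intro i k hk
    simp [pvCuts, h] at hk
  | case4 c rest h hs ih =>
    intro i k hk
    rw [pvCuts.eq_def] at hk
    simp only [h, hs, Bool.false_eq_true, if_false, if_true] at hk
    rcases List.mem_cons.mp hk with rfl | hk'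
    · exact le_rfl
    · have := ih (i + 1) k hk'; omega
  | case5 c rest h hs ih =>
    intro i k hk
    rw [pvCuts.eq_def] at hk
    simp only [h, hs, Bool.false_eq_true, if_false] at hk
    have := ih (i + 1) k hk
    omega

-- shifting the start of the slicing loop back over a fixed prefix prepends that prefix to the first piece
lemma pvPieces_shift (full : List Char) (cuts : List Nat) (pre : List Char) :
    ∀ i d, (full.drop i).take d = pre → (∀ k ∈ cuts, i + d ≤ k) →
      pvPieces full cuts i = pvAddHead pre (pvPieces full cuts (i + d)) := by
  induction cuts with
  | nil =>
    intro i d hpre hb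
    simp only [pvPieces, pvAddHead]
    rw [← hpre, ← List.drop_drop]
    rw [List.take_append_drop]
  | cons k t ih =>
    intro i d hpre hb
    have hk : i + d ≤ k := hb k (List.mem_cons_self)
    simp only [pvPieces, pvAddHead]
    congr 1
    have h1 : k - i = d + (k - (i + d)) := by omega
    rw [h1, List.take_add, ← hpre, ← List.drop_drop]

-- the sliced pieces are exactly the bridge pieces
lemma pvPieces_cuts (sep esc : String) (cs : List Char) :
    ∀ (full : List Char) (i : Nat), full.drop i = cs →
      pvPieces full (pvCuts sep esc cs i) i = pvTokB sep esc cs := by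
  induction cs using pvTokB.induct sep esc with
  | case1 =>
    intro full i hdrop
    simp [pvCuts, pvPieces, pvTokB, hdrop]
  | case2 c h c2 rest2 ih =>
    intro full i hdrop
    have hdrop2 : full.drop (i + 2) = rest2 := by
      rw [← List.drop_drop, hdrop]; rfl
    have hpre : (full.drop i).take 2 = [c, c2] := by rw [hdrop]; rfl
    have hb : ∀ k ∈ pvCuts sep esc rest2 (i + 2), i + 2 ≤ k := pvCuts_ge sep esc rest2 (i + 2)
    simp only [pvCuts, h, if_true]
    rw [pvPieces_shift full _ [c, c2] i 2 hpre hb, ih full (i + 2) hdrop2]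
    have hne := pvTokB_ne_nil sep esc rest2
    obtain ⟨p, ps, hp⟩ := List.exists_cons_of_ne_nil hne
    simp [pvTokB, h, hp, pvAddHead]
  | case3 c h =>
    intro full i hdrop
    have hdrop1 : full.drop (i + 1) = [] := by
      rw [← List.drop_drop, hdrop]; rfl
    simp [pvCuts, h, pvPieces, pvTokB, hdrop]
  | case4 c rest h hs ih =>
    intro full i hdrop
    have hdrop1 : full.drop (i + 1) = rest := by
      rw [← List.drop_drop, hdrop]; rfl
    rw [pvCuts.eq_def]
    simp only [h, hs, Bool.false_eq_true, if_false, if_true]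
    rw [pvTokB_cons_sep sep esc c rest h hs]
    simp only [pvPieces]
    rw [ih full (i + 1) hdrop1]
    simp
  | case5 c rest h hs ih =>
    intro full i hdrop
    have hdrop1 : full.drop (i + 1) = rest := by
      rw [← List.drop_drop, hdrop]; rfl
    have hpre : (full.drop i).take 1 = [c] := by rw [hdrop]; rfl
    have hb : ∀ k ∈ pvCuts sep esc rest (i + 1), i + 1 ≤ k := pvCuts_ge sep esc rest (i + 1)
    rw [pvCuts.eq_def]
    simp only [h, hs, Bool.false_eq_true, if_false]
    rw [pvTokB_cons_other sep esc c rest h hs]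
    rw [pvPieces_shift full _ [c] i 1 hpre hb, ih full (i + 1) hdrop1]
    have hne := pvTokB_ne_nil sep esc rest
    obtain ⟨p, ps, hp⟩ := List.exists_cons_of_ne_nil hne
    simp [hp, pvAddHead]

-- ===== VERDICT (by name: the statement is the Claim_ definition above) =====
theorem split_nmcli_terse_spec : Claim_equal_split_nmcli_terse := by
  intro line sep esc _
  unfold Spec_split_nmcli_terse split_nmcli_terse split_nmcli_terse_alt
  rw [pvLoopA_eq]
  rw [pvPieces_cuts sep esc line.toList line.toList 0 (by simp)]
  have hne := pvTokB_ne_nil sep esc line.toList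
  obtain ⟨p, ps, hp⟩ := List.exists_cons_of_ne_nil hne
  simp [hp, pvAddHead]
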